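-- pv_equiv track=rewrite | github.com/dmcc/waterworks | FigUtil.py | dict_to_table
-- ===== SOURCE A (Python) =====
-- def dict_to_table(d, headers=True, x_header='', reverse=False):
--     """Convert dict with (x, y) as keys to a 2D table."""
--     all_x = set()
--     all_y = set()
--     for x, y in d.keys():
--         all_x.add(x)
--         all_y.add(y)
--     all_x = list(all_x)
--     all_y = list(all_y)
--     all_x.sort()
--     all_y.sort()
--     if reverse:
--         if 'x' in reverse:
--             all_x.reverse()
--         if 'y' in reverse:
--             all_y.reverse()
--
--     if headers:
--         table = [[x_header] + all_y]
--     else: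
--         table = []
--     for i, x in enumerate(all_x):
--         row = [None] * len(all_y)
--         for j, y in enumerate(all_y):
--             row[j] = d.get((x, y))
--         if headers:
--             row.insert(0, x)
--         table.append(row)
--     return table
-- ===== SOURCE B (Python) =====
-- def dict_to_table(d, headers=True, x_header='', reverse=False):
--     """Convert dict with (x, y) as keys to a 2D table.
--
--     Column-major rewrite: preallocate one column of None per y, fill the
--     columns in a single pass over d.items() via positional index maps, then
--     transpose the columns into rows with zip -- instead of A's row-by-row
--     nested loops doing a d.get((x, y)) lookup for every cell of the grid.
--     """
--     all_x = sorted({x for x, y in d.keys()})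
--     all_y = sorted({y for x, y in d.keys()})
--     if reverse:
--         if 'x' in reverse:
--             all_x.reverse()
--         if 'y' in reverse:
--             all_y.reverse()
--     xi = {x: i for i, x in enumerate(all_x)}
--     yj = {y: j for j, y in enumerate(all_y)}
--     cols = [[None] * len(all_x) for _ in all_y]
--     for (x, y), v in d.items():
--         cols[yj[y]][xi[x]] = v
--     if headers:
--         cols.insert(0, all_x)
--     # transposing no columns loses the row count, so that case is spelled out
--     body = [list(r) for r in zip(*cols)] if cols else [[] for _ in all_x]
--     return ([[x_header] + all_y] if headers else []) + body
-- ===== Notes on version B (the rewrite author's own statement) =====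
-- stated objective: faster
-- what changed: B builds the table column-major: it preallocates one None-column per y, fills the columns in a single pass over d.items() through positional index maps {x:i}/{y:j}, and transposes the columns into rows with zip, instead of A's row-major nested loops that do a d.get((x, y)) dict lookup for every cell of the grid.
import Mathlib
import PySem

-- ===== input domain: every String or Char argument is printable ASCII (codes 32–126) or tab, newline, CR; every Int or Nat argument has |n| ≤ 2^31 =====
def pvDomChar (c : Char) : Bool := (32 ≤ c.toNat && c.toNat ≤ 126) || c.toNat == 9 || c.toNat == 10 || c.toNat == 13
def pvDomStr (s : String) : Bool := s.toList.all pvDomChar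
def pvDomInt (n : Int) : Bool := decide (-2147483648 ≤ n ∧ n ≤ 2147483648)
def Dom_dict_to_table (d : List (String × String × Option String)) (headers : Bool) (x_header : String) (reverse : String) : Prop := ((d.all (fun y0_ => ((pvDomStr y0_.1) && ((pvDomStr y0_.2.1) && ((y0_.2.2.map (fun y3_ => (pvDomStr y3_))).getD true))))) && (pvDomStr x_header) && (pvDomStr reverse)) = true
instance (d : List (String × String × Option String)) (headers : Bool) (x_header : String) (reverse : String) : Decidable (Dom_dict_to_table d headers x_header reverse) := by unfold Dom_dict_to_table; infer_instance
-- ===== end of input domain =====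

-- B builds the table column-major: one preallocated None-column per y, filled in a single pass over
-- d.items() via positional index maps, then transposed into rows with zip — instead of A's row-major
-- nested loops with a dict lookup per cell; return values are proved equal on the whole domain.

-- ===== PORT A =====
-- the dict argument (assoc list in insertion order) as the Python dict it denotes
def dict_to_table (d : List (String × String × Option String)) (headers : Bool) (x_header : String) (reverse : String) : List (List (Option String)) :=
  let dct : PySem.Dict (String × String) (Option String) :=
    PySem.Dict.ofList (d.map (fun t => ((t.1, t.2.1), t.2.2)))
  -- for x, y in d.keys(): all_x.add(x); all_y.add(y)
  let sets := dct.keys.foldl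
    (fun (p : PySem.Set String × PySem.Set String) k => (PySem.Set.add p.1 k.1, PySem.Set.add p.2 k.2))
    (PySem.Set.empty, PySem.Set.empty)
  let all_x0 := PySem.List.sorted sets.1 (fun s => s)
  let all_y0 := PySem.List.sorted sets.2 (fun s => s)
  -- 'if reverse:' (truthiness) then "'x' in reverse"
  let all_x := if (reverse != "") && PySem.Str.isIn "x" reverse then all_x0.reverse else all_x0
  let all_y := if (reverse != "") && PySem.Str.isIn "y" reverse then all_y0.reverse else all_y0
  let table0 : List (List (Option String)) :=
    if headers then [some x_header :: all_y.map some] else []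
  -- for i, x in enumerate(all_x): row = [None]*len(all_y); for j, y in enumerate(all_y): row[j] = d.get((x, y))
  (PySem.List.enumerate all_x).foldl (fun table p =>
    let row0 : List (Option String) := List.replicate all_y.length none
    let row := (PySem.List.enumerate all_y).foldl
      (fun row q => row.set q.1.toNat ((dct.get? (p.2, q.2)).join)) row0
    let row' := if headers then PySem.List.insert row 0 (some p.2) else row
    table ++ [row']) table0

-- ===== PORT B =====
-- zip(*cols): take one element from the head of every column, stop as soon as any column is
-- exhausted (mapM head? is none exactly then) — exact for Python's zip over lists
def pyZipT {α : Type} (cols : List (List α)) : List (List α) :=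
  match cols with
  | [] => []
  | c :: cs =>
    match hm : (c :: cs).mapM List.head? with
    | none => []
    | some hds => hds :: pyZipT ((c :: cs).map List.tail)
termination_by (cols.headD []).length
decreasing_by
  cases c with
  | nil => simp [List.mapM_cons] at hm
  | cons a t => simp

def dict_to_table_alt (d : List (String × String × Option String)) (headers : Bool) (x_header : String) (reverse : String) : List (List (Option String)) :=
  let dct : PySem.Dict (String × String) (Option String) :=
    PySem.Dict.ofList (d.map (fun t => ((t.1, t.2.1), t.2.2)))
  -- sorted({x for x, y in d.keys()}) / sorted({y for x, y in d.keys()})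
  let all_x0 := PySem.List.sorted (PySem.Set.ofList (dct.keys.map (fun k => k.1))) (fun s => s)
  let all_y0 := PySem.List.sorted (PySem.Set.ofList (dct.keys.map (fun k => k.2))) (fun s => s)
  let all_x := if (reverse != "") && PySem.Str.isIn "x" reverse then all_x0.reverse else all_x0
  let all_y := if (reverse != "") && PySem.Str.isIn "y" reverse then all_y0.reverse else all_y0
  -- xi = {x: i for i, x in enumerate(all_x)}; yj = {y: j for j, y in enumerate(all_y)}
  let xi : PySem.Dict String Int := PySem.Dict.ofList ((PySem.List.enumerate all_x).map (fun p => (p.2, p.1)))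
  let yj : PySem.Dict String Int := PySem.Dict.ofList ((PySem.List.enumerate all_y).map (fun p => (p.2, p.1)))
  -- cols = [[None] * len(all_x) for _ in all_y]
  let cols0 : List (List (Option String)) := all_y.map (fun _ => List.replicate all_x.length none)
  -- for (x, y), v in d.items(): cols[yj[y]][xi[x]] = v
  -- (yj[y]/xi[x] always hit and the indices are always in range — every item key's parts are in
  --  all_x/all_y by construction — so getD's defaults are dead and set is exact list assignment)
  let cols1 := dct.items.foldl (fun cols kv =>
      cols.set (yj.getD kv.1.2 0).toNat
        ((cols.getD (yj.getD kv.1.2 0).toNat []).set (xi.getD kv.1.1 0).toNat kv.2)) cols0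
  -- if headers: cols.insert(0, all_x)
  let cols := if headers then PySem.List.insert cols1 0 (all_x.map some) else cols1
  -- body = [list(r) for r in zip(*cols)] if cols else [[] for _ in all_x]
  let body := if cols = [] then all_x.map (fun _ => ([] : List (Option String))) else pyZipT cols
  (if headers then [some x_header :: all_y.map some] else []) ++ body

-- ===== PRECONDITION & SPEC =====
def Spec_dict_to_table (d : List (String × String × Option String)) (headers : Bool) (x_header : String) (reverse : String) (out : List (List (Option String))) : Prop := out = dict_to_table_alt d headers x_header reverse
instance (d : List (String × String × Option String)) (headers : Bool) (x_header : String) (reverse : String) (out : List (List (Option String))) : Decidable (Spec_dict_to_table d headers x_header reverse out) := by unfold Spec_dict_to_table; infer_instance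

-- ===== CLAIM (what is proved, stated in full; the proofs are below) =====
def Claim_equal_dict_to_table : Prop := ∀ (d : List (String × String × Option String)) (headers : Bool) (x_header : String) (reverse : String), Dom_dict_to_table d headers x_header reverse → Spec_dict_to_table d headers x_header reverse (dict_to_table d headers x_header reverse)

-- ===== LEMMAS AND PROOFS =====

-- the paired set-collecting fold splits into two independent folds
theorem pair_fold (ks : List (String × String)) (p : PySem.Set String × PySem.Set String) :
    ks.foldl (fun p k => (PySem.Set.add p.1 k.1, PySem.Set.add p.2 k.2)) p
      = (ks.foldl (fun s k => PySem.Set.add s k.1) p.1, ks.foldl (fun s k => PySem.Set.add s k.2) p.2) := by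
  induction ks generalizing p with
  | nil => rfl
  | cons k ks ih => exact ih _

theorem fold_add_map {α β : Type} [BEq β] (l : List α) (g : α → β) :
    l.foldl (fun s t => PySem.Set.add s (g t)) PySem.Set.empty = PySem.Set.ofList (l.map g) := by
  rw [PySem.Set.ofList_eq_foldl, List.foldl_map]; rfl

-- filling [None]*len(ys) at positions j = enumerate index is mapping over ys
theorem fill_eq_map {β : Type} (f : String → β) (ys : List String) (s : Nat) (r : List β)
    (h : r.length = s + ys.length) :
    (PySem.List.enumerate ys (s : Int)).foldl (fun row q => row.set q.1.toNat (f q.2)) r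
      = r.take s ++ ys.map f := by
  induction ys generalizing s r with
  | nil =>
    simp only [List.length_nil, Nat.add_zero] at h
    simp [PySem.List.enumerate_nil, List.take_of_length_le (Nat.le_of_eq h)]
  | cons y ys ih =>
    rw [PySem.List.enumerate_cons, List.foldl_cons]
    have hs : s < r.length := by rw [h, List.length_cons]; omega
    have h1 : ((s : Int) + 1) = ((s + 1 : Nat) : Int) := by push_cast; ring
    have h2 : ((s : Int)).toNat = s := by omega
    rw [h2, h1, ih (s + 1) _ (by rw [List.length_set, h, List.length_cons]; omega)]
    have : (r.set s (f y)).take (s + 1) = r.take s ++ [f y] := by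
      rw [List.take_add_one]
      simp only [List.take_set, List.getElem?_set_self hs]
      rw [List.set_eq_of_length_le (by simp)]
      simp
    rw [this]; simp

theorem fill0 {β : Type} (f : String → β) (ys : List String) (b0 : β) :
    (PySem.List.enumerate ys).foldl (fun row q => row.set q.1.toNat (f q.2)) (List.replicate ys.length b0)
      = ys.map f := by
  have := fill_eq_map f ys 0 (List.replicate ys.length b0) (by simp)
  simpa using this

-- the outer row-appending loop over enumerate(all_x) is a map
theorem foldl_enumerate_append {α β : Type} (xs : List α) (g : α → β) (t0 : List β) :
    (PySem.List.enumerate xs).foldl (fun table p => table ++ [g p.2]) t0 = t0 ++ xs.map g := by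
  have := PySem.List.foldl_append_singleton_eq_map (fun p : Int × α => g p.2) (PySem.List.enumerate xs) t0
  rw [this]
  have : List.map (fun p : Int × α => g p.2) (PySem.List.enumerate xs)
      = List.map g (List.map (fun p : Int × α => p.2) (PySem.List.enumerate xs)) := by
    rw [List.map_map]; rfl
  rw [this, PySem.List.map_snd_enumerate]

-- mapping a function over range(len xs) pointwise equal to f on xs's elements is mapping f over xs
theorem map_range_eq_map {α β : Type} (xs : List α) (g : Nat → β) (f : α → β)
    (h : ∀ i (hi : i < xs.length), g i = f xs[i]) :
    (List.range xs.length).map g = xs.map f := by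
  apply List.ext_getElem
  · simp
  · intro i h1 h2
    simp only [List.getElem_map, List.getElem_range]
    exact h i (by simpa using h2)

-- when every column is nonempty, mapM head? returns all the heads
theorem mapM_head?_eq {α : Type} (cols : List (List α)) (dflt : α) (h : ∀ c ∈ cols, c ≠ []) :
    cols.mapM List.head? = some (cols.map (fun c => c.headD dflt)) := by
  induction cols with
  | nil => rfl
  | cons c cs ih =>
    cases c with
    | nil => exact absurd rfl (h [] (by simp))
    | cons a t =>
      rw [List.mapM_cons, ih (fun c hc => h c (by simp [hc]))]
      rfl

-- zip(*cols) of equal-length columns, characterised by index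
theorem pyZipT_eq {α : Type} (dflt : α) (n : Nat) (cols : List (List α)) (hne : cols ≠ [])
    (hlen : ∀ c ∈ cols, c.length = n) :
    pyZipT cols = (List.range n).map (fun i => cols.map (fun c => c.getD i dflt)) := by
  induction n generalizing cols with
  | zero =>
    cases cols with
    | nil => exact absurd rfl hne
    | cons c cs =>
      have hc : c = [] := List.eq_nil_of_length_eq_zero (hlen c (by simp))
      subst hc
      rw [pyZipT]
      split
      · rfl
      · next hds hm =>
        rw [List.mapM_cons] at hm
        simp at hm
  | succ n ih =>
    have hne' : ∀ c ∈ cols, c ≠ [] := by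
      intro c hc he
      have := hlen c hc
      rw [he] at this
      simp at this
    cases cols with
    | nil => exact absurd rfl hne
    | cons c cs =>
      rw [pyZipT]
      split
      · next hm =>
        rw [mapM_head?_eq (c :: cs) dflt hne'] at hm
        exact absurd hm (by simp)
      · next hds hm =>
        rw [mapM_head?_eq (c :: cs) dflt hne'] at hm
        injection hm with hm
        subst hm
        rw [ih ((c :: cs).map List.tail) (by simp)
          (by
            intro t ht
            obtain ⟨c', hc', rfl⟩ := List.mem_map.1 ht
            have h1 := hlen c' hc'
            have h2 := hne' c' hc'
            cases c' with
            | nil => exact absurd rfl h2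
            | cons a tl => simpa using h1)]
        rw [List.range_succ_eq_map, List.map_cons]
        congr 1
        · have : (fun c : List α => c.headD dflt) = (fun c : List α => c.getD 0 dflt) := by
            funext c'
            cases c' <;> rfl
          show _ = List.map (fun c : List α => c.getD 0 dflt) (c :: cs)
          rw [List.map_cons]
          congr 1
          · cases c <;> rfl
          · rw [this]
        · rw [List.map_map]
          apply List.map_congr_left
          intro i _
          rw [List.map_map]
          apply List.map_congr_left
          intro c' hc'
          obtain ⟨a, t, rfl⟩ := List.exists_cons_of_ne_nil (hne' c' hc')
          rfl

-- the dict {x: i for i, x in enumerate(xs)} has exactly the pairs (xs[i], i) when xs has no duplicates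
theorem idx_items (xs : List String) (hnd : xs.Nodup) :
    (PySem.Dict.ofList ((PySem.List.enumerate xs).map (fun p => (p.2, p.1)))).items
      = (PySem.List.enumerate xs).map (fun p => (p.2, p.1)) := by
  unfold PySem.Dict.ofList PySem.Dict.update
  rw [List.foldl_map]
  rw [PySem.Dict.items_foldl_insert_fresh (PySem.List.enumerate xs) (fun p => p.2) (fun p => p.1)
    PySem.Dict.empty (by intro a _; rfl)
    (by rw [show (List.map (fun p : Int × String => p.2) (PySem.List.enumerate xs)) = xs from PySem.List.map_snd_enumerate xs 0]; exact hnd)]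
  rfl

theorem idx_getD (xs : List String) (hnd : xs.Nodup) (i : Nat) (hi : i < xs.length) :
    (PySem.Dict.ofList ((PySem.List.enumerate xs).map (fun p => (p.2, p.1)))).getD xs[i] 0 = (i : Int) := by
  have hit := idx_items xs hnd
  apply PySem.Dict.getD_of_mem_items
  · rw [hit]
    refine List.mem_map.2 ⟨((i : Int), xs[i]), ?_, rfl⟩
    exact (PySem.List.mem_enumerate_iff _ _ _).2 ⟨i, hi, by simp⟩
  · have : (PySem.Dict.ofList ((PySem.List.enumerate xs).map (fun p => (p.2, p.1)))).keys = xs := by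
      simp only [PySem.Dict.keys, hit, List.map_map]
      exact PySem.List.map_snd_enumerate xs 0
    rw [this]; exact hnd

-- setting index i0 of a map over a duplicate-free list updates the function at xs[i0]
theorem set_map {β : Type} (xs : List String) (hnd : xs.Nodup) (f : String → β)
    (i0 : Nat) (hi0 : i0 < xs.length) (v : β) :
    (xs.map f).set i0 v = xs.map (fun x => if x = xs[i0] then v else f x) := by
  apply List.ext_getElem
  · simp
  · intro i h1 h2
    rw [List.getElem_set, List.getElem_map]
    by_cases hii : i0 = i
    · subst hii; simp
    · have hil : i < xs.length := by simpa using h2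
      have hxx : xs[i] ≠ xs[i0] := by
        intro he
        exact hii ((List.Nodup.getElem_inj_iff hnd).1 he).symm
      simp [hii, hxx]

-- writing v at row index of y, column index of x, updates exactly that cell of the x-by-y grid
theorem set_grid (ax ay : List String) (hax : ax.Nodup) (hay : ay.Nodup)
    (g : String → String → Option String) (i0 j0 : Nat) (hi0 : i0 < ax.length) (hj0 : j0 < ay.length)
    (v : Option String) :
    (ay.map (fun y => ax.map (fun x => g x y))).set j0
        (((ay.map (fun y => ax.map (fun x => g x y))).getD j0 []).set i0 v)
      = ay.map (fun y => ax.map (fun x =>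
          if y = ay[j0] then (if x = ax[i0] then v else g x y) else g x y)) := by
  have hgetD : (ay.map (fun y => ax.map (fun x => g x y))).getD j0 [] = ax.map (fun x => g x ay[j0]) := by
    rw [List.getD_eq_getElem?_getD, List.getElem?_map, List.getElem?_eq_getElem hj0]
    rfl
  rw [hgetD, set_map ax hax (fun x => g x ay[j0]) i0 hi0 v,
    set_map ay hay (fun y => ax.map (fun x => g x y)) j0 hj0]
  apply List.map_congr_left
  intro y _
  by_cases hy0 : y = ay[j0]
  · rw [if_pos hy0]
    apply List.map_congr_left
    intro x _
    rw [if_pos hy0, hy0]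
  · rw [if_neg hy0]
    apply List.map_congr_left
    intro x _
    rw [if_neg hy0]

-- the single item pass fills the grid with exactly the dict's cell values
theorem fill_fold (ax ay : List String) (hax : ax.Nodup) (hay : ay.Nodup)
    (xi yj : PySem.Dict String Int)
    (hI : ∀ i (hi : i < ax.length), xi.getD ax[i] 0 = (i : Int))
    (hJ : ∀ j (hj : j < ay.length), yj.getD ay[j] 0 = (j : Int))
    (l : List ((String × String) × Option String))
    (hnd : (l.map (fun kv => kv.1)).Nodup)
    (hx : ∀ kv ∈ l, kv.1.1 ∈ ax) (hy : ∀ kv ∈ l, kv.1.2 ∈ ay)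
    (g : String → String → Option String) :
    l.foldl (fun cols kv =>
        cols.set (yj.getD kv.1.2 0).toNat
          ((cols.getD (yj.getD kv.1.2 0).toNat []).set (xi.getD kv.1.1 0).toNat kv.2))
      (ay.map (fun y => ax.map (fun x => g x y)))
      = ay.map (fun y => ax.map (fun x =>
          ((PySem.Dict.mk l).get? (x, y)).getD (g x y))) := by
  induction l generalizing g with
  | nil =>
    rw [List.foldl_nil]
    apply List.map_congr_left
    intro y _
    apply List.map_congr_left
    intro x _
    rfl
  | cons kv l ih =>
    rw [List.foldl_cons]
    obtain ⟨i0, hi0, hxe⟩ := List.mem_iff_getElem.1 (hx kv (by simp))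
    obtain ⟨j0, hj0, hye⟩ := List.mem_iff_getElem.1 (hy kv (by simp))
    have hIx : (xi.getD kv.1.1 0).toNat = i0 := by rw [← hxe, hI i0 hi0]; simp
    have hJy : (yj.getD kv.1.2 0).toNat = j0 := by rw [← hye, hJ j0 hj0]; simp
    rw [hIx, hJy, set_grid ax ay hax hay g i0 j0 hi0 hj0 kv.2]
    rw [List.map_cons, List.nodup_cons] at hnd
    rw [ih hnd.2 (fun t ht => hx t (by simp [ht])) (fun t ht => hy t (by simp [ht])) _]
    apply List.map_congr_left
    intro y _
    apply List.map_congr_left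
    intro x _
    rw [PySem.Dict.get?_mk_cons]
    by_cases hk : kv.1 = (x, y)
    · have hbeq : (kv.1 == (x, y)) = true := by rw [hk]; exact beq_self_eq_true _
      rw [hbeq, if_pos rfl]
      have hnone : (PySem.Dict.mk l).get? (x, y) = none := by
        rw [PySem.Dict.get?_eq_none_iff_not_mem_keys, PySem.Dict.keys_mk]
        rw [← hk]
        exact fun hm => hnd.1 (by simpa using hm)
      rw [hnone]
      have hx1 : x = ax[i0] := by rw [hxe, hk]
      have hy1 : y = ay[j0] := by rw [hye, hk]
      simp [hx1, hy1]
    · have hbeq : (kv.1 == (x, y)) = false := beq_eq_false_iff_ne.2 hk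
      rw [hbeq, if_neg (show ¬(false = true) by simp)]
      have hgg : (if y = ay[j0] then (if x = ax[i0] then kv.2 else g x y) else g x y) = g x y := by
        by_cases hy0 : y = ay[j0]
        · rw [if_pos hy0]
          have hx0 : x ≠ ax[i0] := by
            intro hx0
            exact hk (by rw [← hxe.symm.trans hx0.symm, ← hye.symm.trans hy0.symm])
          rw [if_neg hx0]
        · rw [if_neg hy0]
      rw [hgg]

-- the two ports compute equal tables
theorem main_eq (d : List (String × String × Option String)) (headers : Bool)
    (x_header : String) (reverse : String) :
    dict_to_table d headers x_header reverse = dict_to_table_alt d headers x_header reverse := by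
  simp only [dict_to_table, dict_to_table_alt, pair_fold, fold_add_map, PySem.List.insert_zero]
  set dct := PySem.Dict.ofList (d.map (fun t => ((t.1, t.2.1), t.2.2))) with hdct
  set ax0 := PySem.List.sorted (PySem.Set.ofList (dct.keys.map (fun k => k.1))) (fun s : String => s) with hax0
  set ay0 := PySem.List.sorted (PySem.Set.ofList (dct.keys.map (fun k => k.2))) (fun s : String => s) with hay0
  set ax := if (reverse != "" && PySem.Str.isIn "x" reverse) = true then ax0.reverse else ax0 with hax
  set ay := if (reverse != "" && PySem.Str.isIn "y" reverse) = true then ay0.reverse else ay0 with hay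
  have haxnd : ax.Nodup := by
    rw [hax]
    have h0 : ax0.Nodup := ((PySem.List.sorted_perm _ _ _).nodup_iff).2 (PySem.Set.nodup_ofList _)
    split <;> simp [h0]
  have haynd : ay.Nodup := by
    rw [hay]
    have h0 : ay0.Nodup := ((PySem.List.sorted_perm _ _ _).nodup_iff).2 (PySem.Set.nodup_ofList _)
    split <;> simp [h0]
  have haxmem : ∀ a, a ∈ dct.keys.map (fun k => k.1) → a ∈ ax := by
    intro a ha
    have h0 : a ∈ ax0 := ((PySem.List.sorted_perm _ _ _).mem_iff).2 ((PySem.Set.mem_ofList _ _).2 ha)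
    rw [hax]
    split <;> simp [h0]
  have haymem : ∀ a, a ∈ dct.keys.map (fun k => k.2) → a ∈ ay := by
    intro a ha
    have h0 : a ∈ ay0 := ((PySem.List.sorted_perm _ _ _).mem_iff).2 ((PySem.Set.mem_ofList _ _).2 ha)
    rw [hay]
    split <;> simp [h0]
  -- A side: the row fill and the outer append loop are maps
  have hrow : ∀ x : String,
      (List.foldl (fun (row : List (Option String)) (q : Int × String) =>
          row.set q.1.toNat ((dct.get? (x, q.2)).join))
        (List.replicate ay.length none) (PySem.List.enumerate ay))
        = ay.map (fun y => (dct.get? (x, y)).join) :=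
    fun x => fill0 (fun y => (dct.get? (x, y)).join) ay none
  simp only [hrow]
  rw [foldl_enumerate_append ax
    (fun x => if headers = true then
        some x :: ay.map (fun y => (dct.get? (x, y)).join)
      else ay.map (fun y => (dct.get? (x, y)).join))
    (if headers = true then [some x_header :: ay.map some] else [])]
  -- B side: the single item pass fills the grid with the dict's cells
  have hseed : (fun (_ : String) => List.replicate ax.length (none : Option String))
      = (fun (_ : String) => ax.map (fun _ => (none : Option String))) :=
    funext (fun _ => by simp)
  rw [hseed]
  have hnd : (dct.items.map (fun kv => kv.1)).Nodup := by
    have := PySem.Dict.nodup_keys_ofList (d.map (fun t => ((t.1, t.2.1), t.2.2)))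
    simpa [PySem.Dict.keys] using this
  have hfill := fill_fold ax ay haxnd haynd
    (PySem.Dict.ofList ((PySem.List.enumerate ax).map (fun p => (p.2, p.1))))
    (PySem.Dict.ofList ((PySem.List.enumerate ay).map (fun p => (p.2, p.1))))
    (idx_getD ax haxnd) (idx_getD ay haynd)
    dct.items hnd
    (fun kv hkv => haxmem _ (List.mem_map_of_mem (PySem.Dict.mem_keys_of_mem_items _ hkv)))
    (fun kv hkv => haymem _ (List.mem_map_of_mem (PySem.Dict.mem_keys_of_mem_items _ hkv)))
    (fun _ _ => none)
  have hmk : PySem.Dict.mk dct.items = dct := rfl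
  rw [hmk] at hfill
  have hjoin : ∀ (o : Option (Option String)), o.getD none = o.join := fun o => by cases o <;> rfl
  simp only [hjoin] at hfill
  rw [hfill]
  -- now compare the header row plus rows with the header column plus transposed columns
  cases headers with
  | true =>
    simp only [if_true]
    rw [if_neg (show ¬((ax.map some) ::
        ay.map (fun y => ax.map (fun x => (dct.get? (x, y)).join)) = []) by simp)]
    rw [pyZipT_eq (none : Option String) ax.length _ (by simp)
      (by
        intro c hc
        rcases List.mem_cons.1 hc with h | h
        · rw [h]; simp
        · obtain ⟨y, _, rfl⟩ := List.mem_map.1 h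
          simp)]
    congr 1
    refine (map_range_eq_map ax _ _ ?_).symm
    intro i hi
    rw [List.map_cons]
    congr 1
    · rw [List.getD_eq_getElem?_getD, List.getElem?_map, List.getElem?_eq_getElem hi]
      rfl
    · rw [List.map_map]
      apply List.map_congr_left
      intro y _
      show (ax.map (fun x => (dct.get? (x, y)).join)).getD i none = (dct.get? (ax[i], y)).join
      rw [List.getD_eq_getElem?_getD, List.getElem?_map, List.getElem?_eq_getElem hi]
      rfl
  | false =>
    simp only [Bool.false_eq_true, if_false, List.nil_append]
    by_cases hay0 : ay = []
    · rw [if_pos (by rw [hay0]; rfl)]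
      rw [hay0]
      simp
    · rw [if_neg (by simpa using hay0)]
      rw [pyZipT_eq (none : Option String) ax.length _ (by simpa using hay0)
        (by
          intro c hc
          obtain ⟨y, _, rfl⟩ := List.mem_map.1 hc
          simp)]
      refine (map_range_eq_map ax _ _ ?_).symm
      intro i hi
      rw [List.map_map]
      apply List.map_congr_left
      intro y _
      show (ax.map (fun x => (dct.get? (x, y)).join)).getD i none = (dct.get? (ax[i], y)).join
      rw [List.getD_eq_getElem?_getD, List.getElem?_map, List.getElem?_eq_getElem hi]
      rfl

-- ===== VERDICT (by name: the statement is the Claim_ definition above) =====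
theorem dict_to_table_spec : Claim_equal_dict_to_table := by
  intro d headers x_header reverse _
  exact main_eq d headers x_header reverse
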